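-- pv_equiv track=rewrite | github.com/kingsmad/leetcode_2017 | 758.bold-words-in-string.py | boldWords
-- ===== SOURCE A (Python) =====
-- def boldWords(words, S):
--     """
--     :type words: List[str]
--     :type S: str
--     :rtype: str
--     """
--     n = len(S)
--     bold = [0] * n
--     for word in words:
--         st = 0
--         while st < n:
--             p = S[st:].find(word)
--             if (p < 0) : break
--             for x in range(st+p, st+p+len(word)):
--                 bold[x] = 1
--             st += p + 1
--     ans = ''
--     p = 0
--     while p < n:
--         if bold[p] == 0:
--             ans += S[p]
--             p += 1
--             continue
--         q = p + 1
--         while q<n and bold[q] == 1: q = q+1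
--         ans += ('<b>')
--         ans += S[p:q]
--         ans += ('</b>')
--         p = q
--     return ans
-- ===== SOURCE B (Python) =====
-- def boldWords(words, S):
--     n = len(S)
--     out = []
--     prev = False
--     for j in range(n):
--         b = covered(words, S, j)
--         if b and not prev:
--             out.append('<b>')
--         elif prev and not b:
--             out.append('</b>')
--         out.append(S[j])
--         prev = b
--     if prev:
--         out.append('</b>')
--     return ''.join(out)
--
--
-- def covered(words, S, j):
--     # is position j inside some occurrence of some word?
--     for w in words:
--         L = len(w)
--         if L != 0:
--             lo = j + 1 - L
--             if lo < 0:
--                 lo = 0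
--             for t in range(lo, j + 1):
--                 if S.startswith(w, t):
--                     return True
--     return False
-- ===== Notes on version B (the rewrite author's own statement) =====
-- stated objective: alternative
-- what changed: B replaces A's per-word repeated slice-and-find marking of a bold array plus a second run-skipping output loop by a single left-to-right pass that decides 'is position j covered by some word occurrence' directly (checking candidate start positions with startswith) and emits <b>/</b> on coverage transitions.
import Mathlib
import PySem

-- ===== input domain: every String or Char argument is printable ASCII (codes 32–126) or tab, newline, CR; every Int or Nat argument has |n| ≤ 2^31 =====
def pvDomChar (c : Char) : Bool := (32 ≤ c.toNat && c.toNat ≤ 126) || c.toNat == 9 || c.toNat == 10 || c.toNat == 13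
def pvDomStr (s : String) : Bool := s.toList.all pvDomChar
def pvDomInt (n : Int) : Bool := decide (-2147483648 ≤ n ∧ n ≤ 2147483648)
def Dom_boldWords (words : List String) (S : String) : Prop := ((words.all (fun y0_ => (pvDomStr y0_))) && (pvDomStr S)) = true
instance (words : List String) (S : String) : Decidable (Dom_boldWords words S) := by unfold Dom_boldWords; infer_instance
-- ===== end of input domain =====

-- B replaces A's repeated slice-and-find marking pass and run-skipping output loop by a single
-- left-to-right pass that tests "is position j covered by a word occurrence" directly and emits
-- tags on bold/non-bold transitions (objective: alternative; same results, different algorithm).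

-- ===== PORT A =====
-- for x in range(a, a+len): bold[x] = 1   (indices always in range when called)
def pvMark (bold : List Int) (a len : Nat) : List Int :=
  (List.range' a len).foldl (fun bb x => bb.set x 1) bold

-- the 'while st < n' find loop of A for one word
def pvMarkWord (cs w : List Char) (bold : List Int) (st : Nat) : List Int :=
  if _h : st < cs.length then
    let p := PySem.Chars.find (PySem.List.slice cs (some (st : Int)) none) w
    if p < 0 then bold
    else pvMarkWord cs w (pvMark bold (st + p.toNat) w.length) (st + p.toNat + 1)
  else bold
termination_by cs.length - st
decreasing_by omega

-- 'q = p + 1; while q < n and bold[q] == 1: q = q + 1'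
def pvScan (bold : List Int) (n q : Nat) : Nat :=
  if q < n then (if bold.getD q 0 == 1 then pvScan bold n (q + 1) else q) else q
termination_by n - q

theorem le_pvScan (bold : List Int) (n q : Nat) : q ≤ pvScan bold n q := by
  fun_induction pvScan with
  | case1 => omega
  | case2 => omega
  | case3 => omega

-- A's output loop ('ans' is the accumulator)
def pvBuildA (cs : List Char) (bold : List Int) (ans : List Char) (p : Nat) : List Char :=
  if p < cs.length then
    if bold.getD p 0 == 0 then pvBuildA cs bold (ans ++ [cs.getD p ' ']) (p + 1)
    else
      let q := pvScan bold cs.length (p + 1)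
      pvBuildA cs bold
        (ans ++ "<b>".toList ++ PySem.List.slice cs (some (p : Int)) (some (q : Int)) ++ "</b>".toList) q
  else ans
termination_by cs.length - p
decreasing_by
  · omega
  · have := le_pvScan bold cs.length (p + 1); omega

def boldWords (words : List String) (S : String) : String :=
  let cs := S.toList
  let bold := words.foldl (fun b w => pvMarkWord cs w.toList b 0) (List.replicate cs.length 0)
  String.mk (pvBuildA cs bold [] 0)

-- ===== PORT B =====
-- covered(words, S, j): does some nonempty word occur starting at some t with t ≤ j < t + len(w)?
def pvCovered (words : List String) (cs : List Char) (j : Nat) : Bool :=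
  words.any fun w =>
    decide (w.toList.length ≠ 0) &&
      (List.range' (j + 1 - w.toList.length) (j + 1 - (j + 1 - w.toList.length))).any
        (fun t => PySem.Chars.startswith (cs.drop t) w.toList)

-- B's single output pass: emit '<b>' on a false→true transition, '</b>' on true→false,
-- then the character; close the tag after the loop if still inside a bold run
def pvLoopB (words : List String) (cs : List Char) (acc : List Char) (prev : Bool) (j : Nat) :
    List Char :=
  if j < cs.length then
    let b := pvCovered words cs j
    pvLoopB words cs
      (acc ++ (if b && !prev then "<b>".toList else if prev && !b then "</b>".toList else []) ++
        [cs.getD j ' '])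
      b (j + 1)
  else if prev then acc ++ "</b>".toList else acc
termination_by cs.length - j

def boldWords_alt (words : List String) (S : String) : String :=
  String.mk (pvLoopB words S.toList [] false 0)

-- ===== PRECONDITION & SPEC =====
def Spec_boldWords (words : List String) (S : String) (out : String) : Prop := out = boldWords_alt words S
instance (words : List String) (S : String) (out : String) : Decidable (Spec_boldWords words S out) := by unfold Spec_boldWords; infer_instance

-- ===== CLAIM (what is proved, stated in full; the proofs are below) =====
def Claim_equal_boldWords : Prop := ∀ (words : List String) (S : String), Dom_boldWords words S → Spec_boldWords words S (boldWords words S)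

-- ===== LEMMAS AND PROOFS =====

theorem pvSetGetD (l : List Int) (i j : Nat) (a : Int) :
    (l.set i a).getD j 0 = if i = j ∧ i < l.length then a else l.getD j 0 := by
  split_ifs with h
  · obtain ⟨rfl, h2⟩ := h
    simp [List.getD_eq_getElem?_getD, h2]
  · rcases eq_or_ne i j with rfl | hne
    · have h3 : l.length ≤ i := by omega
      simp [List.getD_eq_getElem?_getD, Nat.not_lt.mpr h3]
    · simp [List.getD_eq_getElem?_getD, List.getElem?_set_ne hne]

-- position i is inside an occurrence of some nonempty word
def pvCov (words : List String) (cs : List Char) (i : Nat) : Prop :=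
  ∃ w ∈ words, ∃ t, t ≤ i ∧ i < t + w.toList.length ∧ w.toList <+: cs.drop t

theorem pvCovered_iff (words : List String) (cs : List Char) (j : Nat) :
    pvCovered words cs j = true ↔ pvCov words cs j := by
  unfold pvCovered pvCov
  simp only [List.any_eq_true, Bool.and_eq_true, decide_eq_true_eq, List.mem_range'_1,
    PySem.Chars.startswith_iff]
  constructor
  · rintro ⟨w, hw, hL, t, ⟨ht1, ht2⟩, hpre⟩
    exact ⟨w, hw, t, by omega, by omega, hpre⟩
  · rintro ⟨w, hw, t, ht1, ht2, hpre⟩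
    exact ⟨w, hw, by omega, t, ⟨by omega, by omega⟩, hpre⟩

theorem pvMark_length (bold : List Int) (a len : Nat) : (pvMark bold a len).length = bold.length := by
  induction len generalizing a bold with
  | zero => simp [pvMark]
  | succ len ih =>
    rw [pvMark, List.range'_succ, List.foldl_cons]
    have h := ih (bold.set a 1) (a + 1)
    simp only [pvMark] at h
    simpa using h

theorem pvMark_getD (bold : List Int) (a len i : Nat) :
    (pvMark bold a len).getD i 0 =
      if a ≤ i ∧ i < a + len ∧ i < bold.length then 1 else bold.getD i 0 := by
  induction len generalizing a bold with
  | zero => rw [pvMark]; simp; omega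
  | succ len ih =>
    rw [pvMark, List.range'_succ, List.foldl_cons]
    have h := ih (bold.set a 1) (a + 1)
    simp only [pvMark] at h
    rw [h, pvSetGetD]
    simp only [List.length_set]
    split_ifs <;> first | rfl | omega

theorem pvMarkWord_length (cs w : List Char) (bold : List Int) (st : Nat) :
    (pvMarkWord cs w bold st).length = bold.length := by
  fun_induction pvMarkWord with
  | case1 => rfl
  | case2 _ _ _ _ _ ih => rw [ih, pvMark_length]
  | case3 => rfl

theorem pvMarkWord_getD (cs w : List Char) (bold : List Int) (st i : Nat) :
    bold.length = cs.length →
    (pvMarkWord cs w bold st).getD i 0 =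
      if ∃ t, t ≤ i ∧ st ≤ t ∧ i < t + w.length ∧ w <+: cs.drop t then 1
      else bold.getD i 0 := by
  fun_induction pvMarkWord with
  | case1 bold st h p hp =>
    intro hlen
    rw [if_neg]
    rintro ⟨t, ht1, ht2, ht3, ht4⟩
    have hs : PySem.List.slice cs (some (st : Int)) none = cs.drop st :=
      PySem.List.slice_from_natCast cs st
    have hp1 : p = -1 := by
      have := PySem.Chars.neg_one_le_find (PySem.List.slice cs (some (st : Int)) none) w
      omega
    have hninf : ¬ w <:+: cs.drop st := by
      have h2 := (PySem.Chars.find_eq_neg_one_iff (PySem.List.slice cs (some (st : Int)) none) w).mp hp1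
      rwa [hs] at h2
    apply hninf
    rw [← PySem.Chars.isIn_iff_infix, ← PySem.Chars.exists_prefix_drop_iff_isIn]
    refine ⟨t - st, ?_⟩
    rwa [List.drop_drop, Nat.add_sub_cancel' ht2]
  | case2 bold st h p hp ih =>
    intro hlen
    have hs : PySem.List.slice cs (some (st : Int)) none = cs.drop st :=
      PySem.List.slice_from_natCast cs st
    have hpdef : p = PySem.Chars.find (cs.drop st) w := by rw [← hs]
    clear_value p
    have hp0 : 0 ≤ p := by omega
    obtain ⟨hocc, hmin⟩ := PySem.Chars.find_spec (s := cs.drop st) (sub := w) (hpdef ▸ hp0)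
    rw [← hpdef] at hocc hmin
    rw [List.drop_drop] at hocc
    have hwlen : st + p.toNat + w.length ≤ cs.length := by
      have h1 := hocc.length_le
      rw [List.length_drop] at h1
      have hple := PySem.Chars.find_le_length (List.drop st cs) w
      rw [← hpdef, List.length_drop] at hple
      omega
    rw [ih (by rw [pvMark_length]; exact hlen), pvMark_getD]
    by_cases hg : ∃ t, t ≤ i ∧ st ≤ t ∧ i < t + w.length ∧ w <+: cs.drop t
    · rw [if_pos hg]
      by_cases h1 : ∃ t, t ≤ i ∧ st + p.toNat + 1 ≤ t ∧ i < t + w.length ∧ w <+: cs.drop t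
      · rw [if_pos h1]
      · rw [if_neg h1, if_pos]
        obtain ⟨t, ht1, ht2, ht3, ht4⟩ := hg
        have hteq : t = st + p.toNat := by
          rcases Nat.lt_trichotomy t (st + p.toNat) with hlt | heq | hgt
          · exfalso
            apply hmin (t - st) (by omega)
            rwa [List.drop_drop, Nat.add_sub_cancel' ht2]
          · exact heq
          · exact absurd ⟨t, ht1, by omega, ht3, ht4⟩ h1
        subst hteq
        exact ⟨ht1, by omega, by omega⟩
    · rw [if_neg hg, if_neg, if_neg]
      · rintro ⟨hc1, hc2, hc3⟩
        exact hg ⟨st + p.toNat, hc1, by omega, hc2, hocc⟩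
      · rintro ⟨t, ht1, ht2, ht3, ht4⟩
        exact hg ⟨t, ht1, by omega, ht3, ht4⟩
  | case3 bold st h =>
    intro hlen
    rw [if_neg]
    rintro ⟨t, ht1, ht2, ht3, ht4⟩
    have hnil : cs.drop t = [] := List.drop_eq_nil_of_le (by omega)
    rw [hnil, List.prefix_nil] at ht4
    subst ht4
    simp at ht3
    omega

theorem pvFold_getD (words : List String) (cs : List Char) (bold : List Int) (i : Nat) :
    bold.length = cs.length →
    ((words.foldl (fun b w => pvMarkWord cs w.toList b 0) bold).getD i 0) =
      if ∃ w ∈ words, ∃ t, t ≤ i ∧ i < t + w.toList.length ∧ w.toList <+: cs.drop t then 1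
      else bold.getD i 0 := by
  induction words generalizing bold with
  | nil => intro _; simp
  | cons w ws ih =>
    intro hlen
    rw [List.foldl_cons, ih _ (by rw [pvMarkWord_length]; exact hlen),
        pvMarkWord_getD cs w.toList bold 0 i hlen]
    by_cases hA : ∃ w' ∈ ws, ∃ t, t ≤ i ∧ i < t + w'.toList.length ∧ w'.toList <+: cs.drop t
    · rw [if_pos hA, if_pos (by obtain ⟨w', h1, h2⟩ := hA; exact ⟨w', List.mem_cons_of_mem _ h1, h2⟩)]
    · rw [if_neg hA]
      by_cases hB : ∃ t, t ≤ i ∧ 0 ≤ t ∧ i < t + w.toList.length ∧ w.toList <+: cs.drop t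
      · rw [if_pos hB,
          if_pos (⟨w, List.mem_cons_self, by obtain ⟨t, a, b, c, d⟩ := hB; exact ⟨t, a, c, d⟩⟩ :
            ∃ w' ∈ w :: ws, ∃ t, t ≤ i ∧ i < t + w'.toList.length ∧ w'.toList <+: cs.drop t)]
      · rw [if_neg hB, if_neg]
        rintro ⟨w', hw', t, a, c, d⟩
        rcases List.mem_cons.mp hw' with rfl | hmem
        · exact hB ⟨t, a, by omega, c, d⟩
        · exact hA ⟨w', hmem, t, a, c, d⟩

theorem pvBold_getD (words : List String) (cs : List Char) (i : Nat) :
    ((words.foldl (fun b w => pvMarkWord cs w.toList b 0)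
        (List.replicate cs.length 0)).getD i 0) =
      if pvCovered words cs i then 1 else 0 := by
  rw [pvFold_getD words cs _ i (by simp)]
  have h0 : (List.replicate cs.length (0 : Int)).getD i 0 = 0 := by
    rcases Nat.lt_or_ge i cs.length with h | h
    · simp [List.getD_eq_getElem?_getD,  h]
    · simp [List.getD_eq_getElem?_getD]
  rw [h0]
  by_cases hc : ∃ w ∈ words, ∃ t, t ≤ i ∧ i < t + w.toList.length ∧ w.toList <+: cs.drop t
  · rw [if_pos hc, if_pos ((pvCovered_iff words cs i).mpr hc)]
  · rw [if_neg hc, if_neg (fun hh => hc ((pvCovered_iff words cs i).mp hh))]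

theorem pvScan_spec (bold : List Int) (n q : Nat) : q ≤ n →
    q ≤ pvScan bold n q ∧ pvScan bold n q ≤ n ∧
      (∀ j, q ≤ j → j < pvScan bold n q → bold.getD j 0 = 1) ∧
      (pvScan bold n q = n ∨ ¬ bold.getD (pvScan bold n q) 0 = 1) := by
  fun_induction pvScan with
  | case1 q h hb ih =>
    intro _
    obtain ⟨i1, i2, i3, i4⟩ := ih (by omega)
    refine ⟨by omega, i2, ?_, i4⟩
    intro j hj1 hj2
    rcases eq_or_lt_of_le hj1 with rfl | hlt
    · exact beq_iff_eq.mp hb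
    · exact i3 j hlt hj2
  | case2 q h hb =>
    intro _
    exact ⟨le_refl _, by omega, by omega, Or.inr (by simpa using hb)⟩
  | case3 q h =>
    intro hq
    exact ⟨le_refl _, hq, by omega, Or.inl (by omega)⟩

theorem pvRun (words : List String) (cs : List Char) (acc : List Char) (p d : Nat)
    (h : ∀ j, p ≤ j → j < p + d → pvCovered words cs j = true) (hd : p + d ≤ cs.length) :
    pvLoopB words cs acc true p =
      pvLoopB words cs (acc ++ (cs.drop p).take d) true (p + d) := by
  induction d generalizing p acc with
  | zero => simp
  | succ d ih =>
    have hp : p < cs.length := by omega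
    rw [pvLoopB]
    simp only [hp, if_true, h p (le_refl p) (by omega), Bool.not_true, Bool.and_false,
      Bool.false_eq_true, if_false, List.append_nil]
    rw [ih (acc ++ [cs.getD p ' ']) (p + 1) (fun j h1 h2 => h j (by omega) (by omega)) (by omega)]
    have hdrop : cs.drop p = cs[p] :: cs.drop (p + 1) := List.drop_eq_getElem_cons hp
    have hgd : cs.getD p ' ' = cs[p] := List.getD_eq_getElem cs ' ' hp
    rw [hdrop, List.take_succ_cons, hgd]
    have harith : p + 1 + d = p + (d + 1) := by omega
    rw [← harith]
    simp [List.append_assoc]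

theorem pvMain (words : List String) (cs : List Char) (bold : List Int)
    (hb : ∀ i, bold.getD i 0 = if pvCovered words cs i then 1 else 0)
    (p : Nat) (acc : List Char) (prev : Bool)
    (hprev : prev = true → p < cs.length → pvCovered words cs p = false) :
    pvBuildA cs bold (acc ++ (if prev then "</b>".toList else [])) p =
      pvLoopB words cs acc prev p := by
  generalize hk : cs.length - p = k
  induction k using Nat.strong_induction_on generalizing p acc prev with
  | _ k IH =>
  rcases Nat.lt_or_ge p cs.length with hp | hp
  · by_cases hc : pvCovered words cs p
    · have hprev' : prev = false := by
        cases prev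
        · rfl
        · exact absurd (hprev rfl hp) (by simp [hc])
      subst hprev'
      rw [pvBuildA, pvLoopB]
      have hb1 : bold.getD p 0 = 1 := by rw [hb p, if_pos hc]
      simp only [hp, if_true, hb1, hc, Bool.not_false, Bool.and_true]
      rw [if_neg (by decide)]
      obtain ⟨s1, s2, s3, s4⟩ := pvScan_spec bold cs.length (p + 1) (by omega)
      have hcov : ∀ j, p + 1 ≤ j → j < pvScan bold cs.length (p + 1) →
          pvCovered words cs j = true := by
        intro j h1 h2
        by_contra hcj
        have h3 := hb j
        rw [if_neg hcj] at h3
        have h4 := s3 j h1 h2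
        omega
      have hprev2 : true = true → pvScan bold cs.length (p + 1) < cs.length →
          pvCovered words cs (pvScan bold cs.length (p + 1)) = false := by
        intro _ hqlt
        rcases s4 with heq | hne
        · omega
        · by_contra hcq
          have h3 := hb (pvScan bold cs.length (p + 1))
          rw [if_pos (by simpa using hcq)] at h3
          exact hne h3
      have hrun := pvRun words cs (acc ++ "<b>".toList ++ [cs.getD p ' ']) (p + 1)
        (pvScan bold cs.length (p + 1) - (p + 1))
        (fun j a b => hcov j a (by omega)) (by omega)
      have hq1 : p + 1 + (pvScan bold cs.length (p + 1) - (p + 1)) =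
          pvScan bold cs.length (p + 1) := by omega
      rw [hq1] at hrun
      rw [hrun]
      have hIH := IH (cs.length - pvScan bold cs.length (p + 1)) (by omega)
        (pvScan bold cs.length (p + 1))
        (acc ++ "<b>".toList ++ [cs.getD p ' '] ++
          (cs.drop (p + 1)).take (pvScan bold cs.length (p + 1) - (p + 1)))
        true hprev2 rfl
      rw [← hIH]
      have hsl : PySem.List.slice cs (some (p : Int))
            (some (pvScan bold cs.length (p + 1) : Int)) =
          (cs.drop p).take (pvScan bold cs.length (p + 1) - p) :=
        PySem.List.slice_natCast cs p (pvScan bold cs.length (p + 1))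
      rw [hsl]
      have hsplit : [cs.getD p ' '] ++ (cs.drop (p + 1)).take (pvScan bold cs.length (p + 1) - (p + 1)) =
          (cs.drop p).take (pvScan bold cs.length (p + 1) - p) := by
        rw [List.getD_eq_getElem cs ' ' hp, List.drop_eq_getElem_cons hp]
        have : pvScan bold cs.length (p + 1) - p = (pvScan bold cs.length (p + 1) - (p + 1)) + 1 := by
          omega
        rw [this, List.take_succ_cons]
        rfl
      rw [← hsplit]
      simp [List.append_assoc]
    · rw [pvBuildA, pvLoopB]
      have hb0 : bold.getD p 0 = 0 := by rw [hb p, if_neg hc]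
      simp only [hp, if_true, hb0, (by simpa using hc : pvCovered words cs p = false),
        Bool.false_and]
      rw [if_pos (by decide)]
      have hIH := IH (cs.length - (p + 1)) (by omega) (p + 1)
        (acc ++ (if prev = true then "</b>".toList else []) ++ [cs.getD p ' ']) false
        (by simp) rfl
      simpa [List.append_assoc] using hIH
  · rw [pvBuildA, pvLoopB]
    simp only [Nat.not_lt.mpr hp, if_false]
    cases prev <;> simp

-- ===== VERDICT (by name: the statement is the Claim_ definition above) =====
theorem boldWords_spec : Claim_equal_boldWords := by
  intro words S _
  unfold Spec_boldWords boldWords boldWords_alt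
  have h := pvMain words S.toList _ (pvBold_getD words S.toList) 0 [] false (by simp)
  simpa using congrArg String.mk h
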